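-- pv_equiv track=rewrite | github.com/nishamalviya/Text-Extraction | main.py | _detect_tables_from_aligned_rows
-- ===== SOURCE A (Python) =====
-- from typing import Dict, List, Optional, Tuple
--
-- def _detect_tables_from_aligned_rows(aligned_rows: List[List[str]]) -> List[Dict]:
--     if not aligned_rows:
--         return []
--     col_counts = [sum(1 for c in r if c) for r in aligned_rows]
--     tables: List[Dict] = []
--     start = None
--     for i, cnt in enumerate(col_counts):
--         is_table_row = cnt >= 3
--         if is_table_row and start is None:
--             start = i
--         if not is_table_row and start is not None:
--             if i - start >= 2:
--                 tables.append({"start_row": start, "end_row": i - 1})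
--             start = None
--     if start is not None and len(aligned_rows) - start >= 2:
--         tables.append({"start_row": start, "end_row": len(aligned_rows) - 1})
--     return tables
-- ===== SOURCE B (Python) =====
-- def _detect_tables_from_aligned_rows(aligned_rows):
--     # Phase 1: boolean mask (>=3 non-empty cells) run-length encoded into
--     # maximal runs [value, length].
--     runs = []
--     for r in aligned_rows:
--         b = sum(1 for c in r if c) >= 3
--         if runs and runs[-1][0] == b:
--             runs[-1][1] += 1
--         else:
--             runs.append([b, 1])
--     # Phase 2: keep the True runs of length >= 2.
--     tables = []
--     idx = 0
--     for b, n in runs: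
--         if b and n >= 2:
--             tables.append({"start_row": idx, "end_row": idx + n - 1})
--         idx += n
--     return tables
-- ===== Notes on version B (the rewrite author's own statement) =====
-- stated objective: alternative
-- what changed: Replaces A's single sentinel-tracking scan (optional start index, append-on-fall-edge plus trailing-run fixup) by a two-phase decomposition: run-length encode the per-row table mask, then filter the True runs of length >= 2, with no end-of-list special case.
import Mathlib
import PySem

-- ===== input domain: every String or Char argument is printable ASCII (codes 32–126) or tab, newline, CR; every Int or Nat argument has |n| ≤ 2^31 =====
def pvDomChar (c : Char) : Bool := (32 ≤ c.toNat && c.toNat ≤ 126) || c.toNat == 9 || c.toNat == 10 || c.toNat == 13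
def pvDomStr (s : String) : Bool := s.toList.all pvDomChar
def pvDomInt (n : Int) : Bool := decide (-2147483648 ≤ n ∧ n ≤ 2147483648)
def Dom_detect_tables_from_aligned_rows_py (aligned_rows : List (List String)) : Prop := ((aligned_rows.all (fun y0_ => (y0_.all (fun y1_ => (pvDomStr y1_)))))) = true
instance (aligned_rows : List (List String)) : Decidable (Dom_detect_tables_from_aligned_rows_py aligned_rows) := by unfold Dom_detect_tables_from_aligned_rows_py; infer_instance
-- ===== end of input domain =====

-- B re-decomposes A's single sentinel-tracking scan into two phases (run-length
-- encode the table-row mask, then filter the long True runs); same cost, no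
-- end-of-list special case ('alternative').

-- ===== PORT A =====
-- sum(1 for c in r if c): count truthy (non-empty) strings of a row
def pvColCount (r : List String) : Int :=
  r.foldl (fun a c => if c ≠ "" then a + 1 else a) 0

-- the for-loop over enumerate(col_counts) with state (start, tables),
-- followed (at []) by the trailing 'if start is not None …' fixup; i is the
-- running index, reaching len(aligned_rows) at the end, exactly as in A.
def pvGoA (cnts : List Int) (i : Int) (start : Option Int)
    (tables : List (List (String × Int))) : List (List (String × Int)) :=
  match cnts with
  | [] =>
    match start with
    | some s =>
      if i - s ≥ 2 then tables ++ [[("start_row", s), ("end_row", i - 1)]] else tables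
    | none => tables
  | cnt :: rest =>
    let isT : Bool := decide (cnt ≥ 3)
    let start1 := if isT && start.isNone then some i else start
    let st :=
      if !isT then
        match start1 with
        | some s =>
          ((if i - s ≥ 2 then tables ++ [[("start_row", s), ("end_row", i - 1)]] else tables),
           (none : Option Int))
        | none => (tables, none)
      else (tables, start1)
    pvGoA rest (i + 1) st.2 st.1

def detect_tables_from_aligned_rows_py (aligned_rows : List (List String)) : List (List (String × Int)) :=
  match aligned_rows with
  | [] => []
  | _ => pvGoA (aligned_rows.map pvColCount) 0 none []

-- ===== PORT B =====
-- phase 1 step: Python appends a fresh [b,1] run to 'runs' or bumps the last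
-- run's count; ported with the runs list kept reversed (head = last run).
def pvRleStep (runs : List (Bool × Int)) (b : Bool) : List (Bool × Int) :=
  match runs with
  | (b', n) :: rest => if b' == b then (b', n + 1) :: rest else (b, 1) :: (b', n) :: rest
  | [] => [(b, 1)]

-- phase 2: walk the runs with (tables, idx) accumulator
def pvEmit (runs : List (Bool × Int)) (idx : Int)
    (tables : List (List (String × Int))) : List (List (String × Int)) :=
  match runs with
  | [] => tables
  | (b, n) :: tl =>
    pvEmit tl (idx + n)
      (if b && decide (n ≥ 2) then
        tables ++ [[("start_row", idx), ("end_row", idx + n - 1)]]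
      else tables)

def detect_tables_from_aligned_rows_py_alt (aligned_rows : List (List String)) : List (List (String × Int)) :=
  let runs :=
    (aligned_rows.foldl (fun acc r => pvRleStep acc (decide (pvColCount r ≥ 3))) []).reverse
  pvEmit runs 0 []

-- ===== PRECONDITION & SPEC =====
def Spec_detect_tables_from_aligned_rows_py (aligned_rows : List (List String)) (out : List (List (String × Int))) : Prop := out = detect_tables_from_aligned_rows_py_alt aligned_rows
instance (aligned_rows : List (List String)) (out : List (List (String × Int))) : Decidable (Spec_detect_tables_from_aligned_rows_py aligned_rows out) := by unfold Spec_detect_tables_from_aligned_rows_py; infer_instance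

-- ===== CLAIM (what is proved, stated in full; the proofs are below) =====
def Claim_equal_detect_tables_from_aligned_rows_py : Prop := ∀ (aligned_rows : List (List String)), Dom_detect_tables_from_aligned_rows_py aligned_rows → Spec_detect_tables_from_aligned_rows_py aligned_rows (detect_tables_from_aligned_rows_py aligned_rows)

-- ===== LEMMAS AND PROOFS =====

-- normal form both ports are reduced to: mask list, start s of the pending
-- True-run, pending length p (current index = s + p)
def pvSpec (m : List Bool) (s p : Int) : List (List (String × Int)) :=
  match m with
  | [] => if p ≥ 2 then [[("start_row", s), ("end_row", s + p - 1)]] else []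
  | b :: tl =>
    if b then pvSpec tl s (p + 1)
    else (if p ≥ 2 then [[("start_row", s), ("end_row", s + p - 1)]] else []) ++ pvSpec tl (s + p + 1) 0

def pvConsMerge (b : Bool) (n : Int) (l : List (Bool × Int)) : List (Bool × Int) :=
  match l with
  | (b', k) :: tl => if b' == b then (b, n + k) :: tl else (b, n) :: (b', k) :: tl
  | [] => [(b, n)]

def pvRleR : List Bool → List (Bool × Int)
  | [] => []
  | b :: tl => pvConsMerge b 1 (pvRleR tl)

def pvMergeT (p : Int) (l : List (Bool × Int)) : List (Bool × Int) :=
  if p = 0 then l else pvConsMerge true p l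

theorem pvGoA_spec (cnts : List Int) (i : Int) (start : Option Int)
    (tables : List (List (String × Int))) :
    pvGoA cnts i start tables =
      tables ++ pvSpec (cnts.map (fun c => decide (c ≥ 3)))
        (match start with | none => i | some st => st)
        (match start with | none => 0 | some st => i - st) := by
  induction cnts generalizing i start tables with
  | nil =>
    cases start with
    | none => simp [pvGoA, pvSpec]
    | some s => simp [pvGoA, pvSpec]; split_ifs <;> simp
  | cons cnt rest ih =>
    by_cases h : cnt ≥ 3
    · cases start with
      | none =>
        simp only [pvGoA, h, decide_true, List.map_cons]
        rw [ih]
        have h1 : i + 1 - i = (0 : Int) + 1 := by ring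
        simp [pvSpec, h1]
      | some s =>
        simp only [pvGoA, h, decide_true, List.map_cons]
        rw [ih]
        have h1 : i + 1 - s = (i - s) + 1 := by ring
        simp [pvSpec, h1]
    · cases start with
      | none =>
        simp only [pvGoA, h, decide_false, List.map_cons]
        rw [ih]
        simp [pvSpec]
      | some s =>
        simp only [pvGoA, h, decide_false, List.map_cons]
        rw [ih]
        simp [pvSpec]
        split_ifs <;> simp

theorem pvConsMerge_same (b : Bool) (n : Int) (l : List (Bool × Int)) :
    pvConsMerge b n (pvConsMerge b 1 l) = pvConsMerge b (n + 1) l := by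
  cases l with
  | nil => simp [pvConsMerge]
  | cons hd tl =>
    obtain ⟨b', k⟩ := hd
    by_cases h : b' = b
    · subst h
      simp [pvConsMerge]; ring
    · simp [pvConsMerge, h]

theorem pvConsMerge_diff (b x : Bool) (n : Int) (l : List (Bool × Int)) (h : b ≠ x) :
    pvConsMerge b n (pvConsMerge x 1 l) = (b, n) :: pvConsMerge x 1 l := by
  cases l with
  | nil => simp [pvConsMerge, Ne.symm h]
  | cons hd tl =>
    obtain ⟨b', k⟩ := hd
    by_cases hx : b' = x
    · subst hx; simp [pvConsMerge, Ne.symm h]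
    · simp [pvConsMerge, hx, Ne.symm h]

theorem pvFoldl_rle (m : List Bool) (b : Bool) (n : Int) (rest : List (Bool × Int)) :
    (List.foldl pvRleStep ((b, n) :: rest) m).reverse =
      rest.reverse ++ pvConsMerge b n (pvRleR m) := by
  induction m generalizing b n rest with
  | nil => simp [pvRleR, pvConsMerge]
  | cons x tl ih =>
    by_cases h : b = x
    · subst h
      simp only [List.foldl_cons, pvRleStep, beq_self_eq_true, if_true]
      rw [ih, pvRleR, pvConsMerge_same]
    · have hb : (b == x) = false := by simp [h]
      have hstep : pvRleStep ((b, n) :: rest) x = (x, 1) :: (b, n) :: rest := by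
        simp [pvRleStep, hb]
      simp only [List.foldl_cons, hstep]
      rw [ih (rest := (b, n) :: rest), pvRleR, pvConsMerge_diff b x n _ h]
      simp

theorem pvFoldl_rle_nil (m : List Bool) :
    (List.foldl pvRleStep [] m).reverse = pvRleR m := by
  cases m with
  | nil => simp [pvRleR]
  | cons x tl =>
    simp only [List.foldl_cons, pvRleStep]
    rw [pvFoldl_rle]
    simp [pvRleR]

theorem pvEmit_consMerge_false (L : List (Bool × Int)) (s : Int)
    (tb : List (List (String × Int))) :
    pvEmit (pvConsMerge false 1 L) s tb = pvEmit L (s + 1) tb := by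
  cases L with
  | nil => simp [pvConsMerge, pvEmit]
  | cons hd T =>
    obtain ⟨b', k⟩ := hd
    cases b' with
    | false =>
      simp [pvConsMerge, pvEmit]
      ring_nf
    | true => simp [pvConsMerge, pvEmit]

theorem pvEmit_mergeT (p : Int) (L : List (Bool × Int)) (s : Int)
    (tb : List (List (String × Int))) (hp : 0 ≤ p)
    (hL : L.head?.all (fun x => x.1 = false)) :
    pvEmit (pvMergeT p L) s tb =
      pvEmit L (s + p)
        (if p ≥ 2 then tb ++ [[("start_row", s), ("end_row", s + p - 1)]] else tb) := by
  by_cases h : p = 0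
  · subst h
    simp [pvMergeT, show ¬((0:Int) ≥ 2) from by omega]
  · simp only [pvMergeT, h, if_false]
    cases L with
    | nil => simp [pvConsMerge, pvEmit]
    | cons hd T =>
      obtain ⟨b', k⟩ := hd
      have hb : b' = false := by simpa using hL
      subst hb
      simp [pvConsMerge, pvEmit]

theorem pvEmit_spec (m : List Bool) (p s : Int) (tables : List (List (String × Int)))
    (hp : 0 ≤ p) :
    pvEmit (pvMergeT p (pvRleR m)) s tables = tables ++ pvSpec m s p := by
  induction m generalizing p s tables with
  | nil =>
    by_cases h : p = 0
    · subst h; simp [pvMergeT, pvRleR, pvEmit, pvSpec]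
    · simp only [pvMergeT, h, if_false, pvRleR, pvConsMerge, pvEmit, pvSpec,
        Bool.true_and, decide_eq_true_iff]
      split_ifs with h2 <;> simp
  | cons b tl ih =>
    cases b with
    | true =>
      have key : pvMergeT p (pvRleR (true :: tl)) = pvMergeT (p + 1) (pvRleR tl) := by
        rw [pvRleR]
        by_cases h : p = 0
        · subst h; simp [pvMergeT]
        · have hp1 : p + 1 ≠ 0 := by omega
          simp only [pvMergeT, h, hp1, if_false]
          rw [pvConsMerge_same]
      rw [key, ih (p + 1) s tables (by omega)]
      simp [pvSpec]
    | false =>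
      have hhead : (pvConsMerge false 1 (pvRleR tl)).head?.all (fun x => x.1 = false) := by
        cases hl : pvRleR tl with
        | nil => simp [pvConsMerge]
        | cons hd T =>
          obtain ⟨b', k⟩ := hd
          cases b' <;> simp [pvConsMerge]
      rw [pvRleR, pvEmit_mergeT p _ s tables hp hhead, pvEmit_consMerge_false]
      have h0 : pvRleR tl = pvMergeT 0 (pvRleR tl) := by simp [pvMergeT]
      rw [h0, ih 0 (s + p + 1) _ le_rfl]
      clear ih h0 hhead
      simp only [pvSpec]
      split_ifs <;> simp_all

theorem pvMask_eq (rows : List (List String)) :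
    rows.map (fun r => decide (pvColCount r ≥ 3)) =
      (rows.map pvColCount).map (fun c => decide (c ≥ 3)) := by
  simp [List.map_map]

-- ===== VERDICT (by name: the statement is the Claim_ definition above) =====
theorem detect_tables_from_aligned_rows_py_spec : Claim_equal_detect_tables_from_aligned_rows_py := by
  intro rows _
  unfold Spec_detect_tables_from_aligned_rows_py
  unfold detect_tables_from_aligned_rows_py detect_tables_from_aligned_rows_py_alt
  have hfold : (rows.foldl (fun acc r => pvRleStep acc (decide (pvColCount r ≥ 3))) []).reverse
      = pvRleR (rows.map (fun r => decide (pvColCount r ≥ 3))) := by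
    rw [← pvFoldl_rle_nil, List.foldl_map]
  cases rows with
  | nil => simp [pvEmit]
  | cons r rest =>
    simp only
    rw [hfold]
    have h0 : pvRleR ((r :: rest).map (fun r => decide (pvColCount r ≥ 3)))
        = pvMergeT 0 (pvRleR ((r :: rest).map (fun r => decide (pvColCount r ≥ 3)))) := by
      simp [pvMergeT]
    rw [h0, pvEmit_spec _ 0 0 [] le_rfl, pvGoA_spec]
    rw [pvMask_eq]
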